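-- pv_equiv track=rewrite | github.com/phoenixway/local_bookmarks | runtime_edit_guards.py | _build_kotlin_file
-- ===== SOURCE A (Python) =====
-- def _normalize_line(line: str) -> str:
--     return line.strip()
--
-- def _build_kotlin_file(package_line: str | None, imports: list[str], body_lines: list[str]) -> str:
--     chunks: list[str] = []
--     if package_line:
--         chunks.append(package_line)
--     if imports:
--         if chunks:
--             chunks.append("")
--         chunks.extend(imports)
--     trimmed_body = list(body_lines)
--     while trimmed_body and not _normalize_line(trimmed_body[0]):
--         trimmed_body = trimmed_body[1:]
--     if trimmed_body:
--         if chunks: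
--             chunks.append("")
--         chunks.extend(trimmed_body)
--     if not chunks:
--         return ""
--     return "\n".join(chunks) + "\n"
-- ===== SOURCE B (Python) =====
-- def _build_kotlin_file(package_line, imports, body_lines):
--     # Build per-section block strings and join them with a blank line,
--     # instead of a flat line list with empty-string separator sentinels.
--     blocks = []
--     if package_line:
--         blocks.append(package_line)
--     if imports:
--         blocks.append("\n".join(imports))
--     i = 0
--     while i < len(body_lines) and not body_lines[i].strip():
--         i += 1
--     if i < len(body_lines):
--         blocks.append("\n".join(body_lines[i:]))
--     return "\n\n".join(blocks) + "\n" if blocks else ""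
-- ===== Notes on version B (the rewrite author's own statement) =====
-- stated objective: simpler
-- what changed: B represents the file as per-section block strings joined by a double newline (and trims leading blank body lines by an index scan), instead of A's flat line list with empty-string separator sentinels and repeated list slicing.
import Mathlib
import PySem

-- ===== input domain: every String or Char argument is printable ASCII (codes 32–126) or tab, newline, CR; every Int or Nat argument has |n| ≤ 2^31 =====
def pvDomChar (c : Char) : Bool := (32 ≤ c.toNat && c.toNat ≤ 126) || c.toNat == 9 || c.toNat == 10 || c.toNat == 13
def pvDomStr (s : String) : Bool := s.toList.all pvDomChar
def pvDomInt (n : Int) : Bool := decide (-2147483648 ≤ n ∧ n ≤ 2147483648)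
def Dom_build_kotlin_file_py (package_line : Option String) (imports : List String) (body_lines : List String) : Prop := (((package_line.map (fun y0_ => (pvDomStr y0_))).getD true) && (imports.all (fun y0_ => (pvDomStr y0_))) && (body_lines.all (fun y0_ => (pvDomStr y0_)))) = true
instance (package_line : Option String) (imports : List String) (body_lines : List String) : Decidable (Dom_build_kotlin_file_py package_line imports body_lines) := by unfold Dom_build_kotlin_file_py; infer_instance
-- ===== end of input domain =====

-- B builds per-section block strings joined by "\n\n" (trimming leading blank body
-- lines by an index scan) instead of A's flat chunk list with "" separator sentinels;
-- objective: simpler.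

-- ===== PORT A =====
-- the `while trimmed_body and not _normalize_line(trimmed_body[0]): trimmed_body = trimmed_body[1:]` loop
def pvTrimLeadA : List String → List String
  | [] => []
  | l :: ls => if PySem.Str.strip l = "" then pvTrimLeadA ls else l :: ls

def build_kotlin_file_py (package_line : Option String) (imports : List String) (body_lines : List String) : String :=
  let chunks : List String :=
    match package_line with
    | some s => if s = "" then [] else [s]   -- `if package_line:` (truthy: not None, nonempty)
    | none => []
  let chunks := if imports = [] then chunks
                else (if chunks = [] then chunks else chunks ++ [""]) ++ imports
  let trimmed_body := pvTrimLeadA body_lines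
  let chunks := if trimmed_body = [] then chunks
                else (if chunks = [] then chunks else chunks ++ [""]) ++ trimmed_body
  if chunks = [] then "" else PySem.Str.join "\n" chunks ++ "\n"

-- ===== PORT B =====
-- the `while i < len(body_lines) and not body_lines[i].strip(): i += 1` counter
def pvSkipBlanks : List String → Nat
  | [] => 0
  | l :: ls => if PySem.Str.strip l = "" then pvSkipBlanks ls + 1 else 0

def build_kotlin_file_py_alt (package_line : Option String) (imports : List String) (body_lines : List String) : String :=
  let blocks : List String :=
    (match package_line with
     | some s => if s = "" then [] else [s]
     | none => []) ++
    (if imports = [] then [] else [PySem.Str.join "\n" imports]) ++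
    (let body := body_lines.drop (pvSkipBlanks body_lines)
     if body = [] then [] else [PySem.Str.join "\n" body])
  if blocks = [] then "" else PySem.Str.join "\n\n" blocks ++ "\n"

-- ===== PRECONDITION & SPEC =====
def Spec_build_kotlin_file_py (package_line : Option String) (imports : List String) (body_lines : List String) (out : String) : Prop := out = build_kotlin_file_py_alt package_line imports body_lines
instance (package_line : Option String) (imports : List String) (body_lines : List String) (out : String) : Decidable (Spec_build_kotlin_file_py package_line imports body_lines out) := by unfold Spec_build_kotlin_file_py; infer_instance

-- ===== CLAIM (what is proved, stated in full; the proofs are below) =====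
def Claim_equal_build_kotlin_file_py : Prop := ∀ (package_line : Option String) (imports : List String) (body_lines : List String), Dom_build_kotlin_file_py package_line imports body_lines → Spec_build_kotlin_file_py package_line imports body_lines (build_kotlin_file_py package_line imports body_lines)

-- ===== LEMMAS AND PROOFS =====

-- A's slicing loop and B's index scan trim the same prefix
theorem trim_eq_drop_skip (bs : List String) : pvTrimLeadA bs = bs.drop (pvSkipBlanks bs) := by
  induction bs with
  | nil => rfl
  | cons l ls ih =>
    simp only [pvTrimLeadA, pvSkipBlanks]
    split <;> simp [ih]

theorem str_eq_of_toList {a b : String} (h : a.toList = b.toList) : a = b :=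
  String.toList_inj.mp h

-- joining with "\n" across an "" sentinel chunk = double newline between the two joins
theorem join_blank (xs ys : List (List Char)) (hx : xs ≠ []) (hy : ys ≠ []) :
    PySem.Chars.join ['\n'] (xs ++ [] :: ys)
      = PySem.Chars.join ['\n'] xs ++ ['\n', '\n'] ++ PySem.Chars.join ['\n'] ys := by
  induction xs with
  | nil => exact absurd rfl hx
  | cons x xs ih =>
    cases xs with
    | nil =>
      cases ys with
      | nil => exact absurd rfl hy
      | cons y ys => simp [PySem.Chars.join_cons_cons, PySem.Chars.join_singleton]
    | cons x' xs' =>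
      have h := ih (by simp)
      simp only [List.cons_append, PySem.Chars.join_cons_cons] at h ⊢
      simp [h]

theorem j1_single (a : String) : PySem.Str.join "\n" [a] = a := by
  apply str_eq_of_toList
  simp [PySem.Str.toList_join, PySem.Chars.join_singleton]

theorem j2_single (a : String) : PySem.Str.join "\n\n" [a] = a := by
  apply str_eq_of_toList
  simp [PySem.Str.toList_join, PySem.Chars.join_singleton]

theorem j2_cons (a b : String) (l : List String) :
    PySem.Str.join "\n\n" (a :: b :: l) = a ++ "\n\n" ++ PySem.Str.join "\n\n" (b :: l) := by
  apply str_eq_of_toList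
  simp [PySem.Str.toList_join, PySem.Chars.join_cons_cons]

theorem j1_blank (xs ys : List String) (hx : xs ≠ []) (hy : ys ≠ []) :
    PySem.Str.join "\n" (xs ++ "" :: ys)
      = PySem.Str.join "\n" xs ++ "\n\n" ++ PySem.Str.join "\n" ys := by
  apply str_eq_of_toList
  simp [PySem.Str.toList_join, join_blank (xs.map String.toList) (ys.map String.toList)
    (by simpa using hx) (by simpa using hy)]

-- the two sentinel shapes that arise, in cons-normal form (usable by simp)
theorem jA (x y : String) (l : List String) :
    PySem.Str.join "\n" (x :: "" :: y :: l) = x ++ "\n\n" ++ PySem.Str.join "\n" (y :: l) := by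
  have h := j1_blank [x] (y :: l) (by simp) (by simp)
  simpa [j1_single] using h

theorem jB (x y : String) (l m : List String) :
    PySem.Str.join "\n" (x :: (l ++ "" :: y :: m))
      = PySem.Str.join "\n" (x :: l) ++ "\n\n" ++ PySem.Str.join "\n" (y :: m) := by
  have h := j1_blank (x :: l) (y :: m) (by simp) (by simp)
  simpa using h

-- ===== VERDICT (by name: the statement is the Claim_ definition above) =====
theorem build_kotlin_file_py_spec : Claim_equal_build_kotlin_file_py := by
  intro package_line imports body_lines _
  unfold Spec_build_kotlin_file_py build_kotlin_file_py build_kotlin_file_py_alt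
  simp only [trim_eq_drop_skip]
  generalize body_lines.drop (pvSkipBlanks body_lines) = T
  rcases package_line with _ | s
  · rcases imports with _ | ⟨i, is⟩ <;> rcases T with _ | ⟨t, ts⟩ <;>
      simp [jA, jB, j1_single, j2_single, j2_cons, List.append_assoc, String.append_assoc]
  · by_cases hs : s = "" <;>
      rcases imports with _ | ⟨i, is⟩ <;> rcases T with _ | ⟨t, ts⟩ <;>
      simp [hs, jA, jB, j1_single, j2_single, j2_cons, List.append_assoc, String.append_assoc]
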